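-- pv_equiv track=rewrite | github.com/andy2167565/leetcode | Hard/2321_maximum-score-of-spliced-array/maximum-score-of-spliced-array.py | maximumsSplicedArray
-- ===== SOURCE A (Python) =====
-- from typing import List
--
-- def maximumsSplicedArray(nums1: List[int], nums2: List[int]) -> int:
--     def kadane(nums1, nums2):
--         max_diff = curr_diff = 0
--         for num1, num2 in zip(nums1, nums2):
--             curr_diff = max(0, curr_diff + num1 - num2)
--             max_diff = max(max_diff, curr_diff)
--         return sum(nums2) + max_diff
--     return max(kadane(nums1, nums2), kadane(nums2, nums1))
-- ===== SOURCE B (Python) =====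
-- from typing import List
--
-- def maximumsSplicedArray(nums1: List[int], nums2: List[int]) -> int:
--     def gain(xs, ys):
--         # max subarray sum (empty allowed) of xs-ys via prefix sums and running min prefix
--         total = 0
--         min_prefix = 0
--         best = 0
--         for x, y in zip(xs, ys):
--             total += x - y
--             if total < min_prefix:
--                 min_prefix = total
--             if total - min_prefix > best:
--                 best = total - min_prefix
--         return best
--     return max(sum(nums2) + gain(nums1, nums2), sum(nums1) + gain(nums2, nums1))
-- ===== Notes on version B (the rewrite author's own statement) =====
-- stated objective: alternative
-- what changed: Replaces Kadane's reset-at-zero accumulator with the prefix-sum / running-minimum-prefix formulation of maximum subarray sum, maintaining (running total, min prefix, best) instead of (current, best); plain comparisons replace per-iteration max() calls.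
import Mathlib
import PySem

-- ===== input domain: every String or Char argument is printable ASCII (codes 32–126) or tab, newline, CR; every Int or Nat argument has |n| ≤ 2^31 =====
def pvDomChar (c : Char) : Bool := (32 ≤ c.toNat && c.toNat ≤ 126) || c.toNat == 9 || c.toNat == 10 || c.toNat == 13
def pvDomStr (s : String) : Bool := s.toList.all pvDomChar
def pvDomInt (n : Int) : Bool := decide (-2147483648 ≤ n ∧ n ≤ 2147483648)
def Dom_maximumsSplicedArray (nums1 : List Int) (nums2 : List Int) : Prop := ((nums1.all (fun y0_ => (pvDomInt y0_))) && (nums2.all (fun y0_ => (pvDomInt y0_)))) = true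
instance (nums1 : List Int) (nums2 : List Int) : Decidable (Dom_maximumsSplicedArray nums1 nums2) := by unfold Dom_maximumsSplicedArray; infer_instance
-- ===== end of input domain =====

-- B replaces Kadane's reset-at-zero accumulator with the prefix-sum / running-min-prefix
-- formulation of maximum subarray sum (alternative decomposition, same O(n) cost).

-- ===== PORT A =====
-- kadane(nums1, nums2): fold over zip with state (max_diff, curr_diff)
def pvKadane (a : List Int) (b : List Int) : Int :=
  let st := (List.zip a b).foldl
    (fun (st : Int × Int) p =>
      let curr := max 0 (st.2 + p.1 - p.2)
      (max st.1 curr, curr)) (0, 0)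
  b.sum + st.1

def maximumsSplicedArray (nums1 : List Int) (nums2 : List Int) : Int :=
  max (pvKadane nums1 nums2) (pvKadane nums2 nums1)

-- ===== PORT B =====
-- gain(xs, ys): fold over zip with state (total, min_prefix, best)
def pvGain (xs : List Int) (ys : List Int) : Int :=
  let st := (List.zip xs ys).foldl
    (fun (st : Int × Int × Int) p =>
      let total := st.1 + p.1 - p.2
      let minp := if total < st.2.1 then total else st.2.1
      let best := if total - minp > st.2.2 then total - minp else st.2.2
      (total, minp, best)) (0, 0, 0)
  st.2.2

def maximumsSplicedArray_alt (nums1 : List Int) (nums2 : List Int) : Int :=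
  max (nums2.sum + pvGain nums1 nums2) (nums1.sum + pvGain nums2 nums1)

-- ===== PRECONDITION & SPEC =====
def Spec_maximumsSplicedArray (nums1 : List Int) (nums2 : List Int) (out : Int) : Prop := out = maximumsSplicedArray_alt nums1 nums2
instance (nums1 : List Int) (nums2 : List Int) (out : Int) : Decidable (Spec_maximumsSplicedArray nums1 nums2 out) := by unfold Spec_maximumsSplicedArray; infer_instance

-- ===== CLAIM (what is proved, stated in full; the proofs are below) =====
def Claim_equal_maximumsSplicedArray : Prop := ∀ (nums1 : List Int) (nums2 : List Int), Dom_maximumsSplicedArray nums1 nums2 → Spec_maximumsSplicedArray nums1 nums2 (maximumsSplicedArray nums1 nums2)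

-- ===== LEMMAS AND PROOFS =====

-- Loop invariant: Kadane's state (m, c) corresponds to B's state (t, mp, best)
-- via c = t - mp and m = best; this is preserved by each step.
theorem pvFold_eq (l : List (Int × Int)) (m c t mp best : Int)
    (hc : c = t - mp) (hm : m = best) :
    ((l.foldl (fun (st : Int × Int) p =>
        let curr := max 0 (st.2 + p.1 - p.2)
        (max st.1 curr, curr)) (m, c))).1
    = ((l.foldl (fun (st : Int × Int × Int) p =>
        let total := st.1 + p.1 - p.2
        let minp := if total < st.2.1 then total else st.2.1
        let best := if total - minp > st.2.2 then total - minp else st.2.2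
        (total, minp, best)) (t, mp, best))).2.2 := by
  induction l generalizing m c t mp best with
  | nil => simpa using hm
  | cons p rest ih =>
      simp only [List.foldl_cons]
      apply ih
      · subst hc; split_ifs <;> omega
      · subst hc hm; split_ifs <;> omega

theorem pvKadane_eq (a b : List Int) : pvKadane a b = b.sum + pvGain a b := by
  unfold pvKadane pvGain
  have h := pvFold_eq (List.zip a b) 0 0 0 0 0 rfl rfl
  simp only [h]

-- ===== VERDICT (by name: the statement is the Claim_ definition above) =====
theorem maximumsSplicedArray_spec : Claim_equal_maximumsSplicedArray := by
  intro nums1 nums2 _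
  unfold Spec_maximumsSplicedArray maximumsSplicedArray maximumsSplicedArray_alt
  rw [pvKadane_eq, pvKadane_eq]
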